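-- pv_equiv track=rewrite | github.com/IvanovKirillK/cucm_bulk | input_data_parser.py | get_ad_user
-- ===== SOURCE A (Python) =====
-- def get_ad_user(short_number, user_list):
--     ad_user = None
--     for user in user_list:
--         temp_list = user.split('\t')
--         if temp_list[0] == short_number:
--             ad_user = temp_list[1].rstrip('\n')
--         else:
--             continue
--     return ad_user
-- ===== SOURCE B (Python) =====
-- def get_ad_user(short_number, user_list):
--     for user in reversed(user_list):
--         fields = user.split('\t')
--         if fields[0] == short_number:
--             return fields[1].rstrip('\n')
--     return None
-- ===== Notes on version B (the rewrite author's own statement) =====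
-- stated objective: idiomatic
-- what changed: Replaces the full forward pass that overwrites ad_user on every match with a reverse scan that returns the first (= last original) match immediately.
import Mathlib
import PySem

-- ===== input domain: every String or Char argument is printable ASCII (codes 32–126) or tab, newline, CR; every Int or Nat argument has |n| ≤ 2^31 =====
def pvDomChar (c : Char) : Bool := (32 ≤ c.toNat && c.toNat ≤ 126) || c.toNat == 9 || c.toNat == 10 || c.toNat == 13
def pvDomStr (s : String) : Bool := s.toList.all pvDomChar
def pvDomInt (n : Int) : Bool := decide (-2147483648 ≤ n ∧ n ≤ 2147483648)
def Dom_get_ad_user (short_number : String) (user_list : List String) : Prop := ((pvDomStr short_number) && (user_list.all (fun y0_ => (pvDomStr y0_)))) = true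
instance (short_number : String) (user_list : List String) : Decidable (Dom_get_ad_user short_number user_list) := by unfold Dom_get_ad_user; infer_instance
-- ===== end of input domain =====

-- B rewrites A's full forward pass (overwriting ad_user on every match) as a reverse scan
-- that returns at the first match; same return value wherever A returns (idiomatic rewrite).

-- shared exact port of Python's s.rstrip('\n'): drop trailing '\n' characters
def rstripNL (cs : List Char) : List Char := (cs.reverse.dropWhile (· == '\n')).reverse

-- ===== PORT A =====
-- forward fold over user_list, accumulator ad_user overwritten on every match
def get_ad_user (short_number : String) (user_list : List String) : Option String :=
  user_list.foldl
    (fun ad_user user =>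
      let temp_list := PySem.Chars.splitOn user.toList "\t".toList
      if PySem.List.pyGet? temp_list 0 = some short_number.toList then
        match PySem.List.pyGet? temp_list 1 with
        | some t => some (String.ofList (rstripNL t))
        | none => ad_user   -- Python raises IndexError here; excluded by Pre_
      else ad_user)
    none

-- ===== PORT B =====
-- reverse scan with early exit: first match in reversed(user_list) wins
def getAdUserRev (sn : List Char) : List String → Option String
  | [] => none
  | user :: rest =>
    let fields := PySem.Chars.splitOn user.toList "\t".toList
    if PySem.List.pyGet? fields 0 = some sn then
      (PySem.List.pyGet? fields 1).map (fun t => String.ofList (rstripNL t))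
      -- Python raises IndexError when fields[1] is missing; excluded by Pre_
    else getAdUserRev sn rest

def get_ad_user_alt (short_number : String) (user_list : List String) : Option String :=
  getAdUserRev short_number.toList user_list.reverse

-- ===== PRECONDITION & SPEC =====
-- Pre_ excludes exactly the inputs on which Python A raises IndexError: an entry whose
-- first tab-separated field equals short_number but which has no second field.
def Pre_get_ad_user (short_number : String) (user_list : List String) : Prop :=
  ∀ u ∈ user_list,
    (PySem.Chars.splitOn u.toList "\t".toList).head? = some short_number.toList →
    2 ≤ (PySem.Chars.splitOn u.toList "\t".toList).length
instance (short_number : String) (user_list : List String) : Decidable (Pre_get_ad_user short_number user_list) := by unfold Pre_get_ad_user; infer_instance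

def pvWitness_get_ad_user : String × List String := ("101", ["100\tada", "101\tbob\n", "101\tcarol"])

def Spec_get_ad_user (short_number : String) (user_list : List String) (out : Option String) : Prop := out = get_ad_user_alt short_number user_list
instance (short_number : String) (user_list : List String) (out : Option String) : Decidable (Spec_get_ad_user short_number user_list out) := by unfold Spec_get_ad_user; infer_instance

-- ===== CLAIM (what is proved, stated in full; the proofs are below) =====
def Claim_equal_get_ad_user : Prop := ∀ (short_number : String) (user_list : List String), Dom_get_ad_user short_number user_list → Pre_get_ad_user short_number user_list → Spec_get_ad_user short_number user_list (get_ad_user short_number user_list)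

-- ===== LEMMAS AND PROOFS =====

-- the per-element condition of Pre_
def PreElem (sn : List Char) (u : String) : Prop :=
  (PySem.Chars.splitOn u.toList "\t".toList).head? = some sn →
  2 ≤ (PySem.Chars.splitOn u.toList "\t".toList).length

lemma pyGet?_zero {α} (xs : List α) : PySem.List.pyGet? xs 0 = xs.head? := by
  cases xs <;> simp [PySem.List.pyGet?, PySem.List.pyIdx?]

lemma pyGet?_one {α} (xs : List α) : PySem.List.pyGet? xs 1 = xs[1]? := by
  cases xs with
  | nil => simp [PySem.List.pyGet?, PySem.List.pyIdx?]
  | cons a t => cases t <;> simp [PySem.List.pyGet?, PySem.List.pyIdx?]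

lemma tab_eq : "\t".toList = ['\t'] := rfl

lemma hit_field (sn : List Char) (u : String) (hp : PreElem sn u)
    (h : PySem.List.pyGet? (PySem.Chars.splitOn u.toList "\t".toList) 0 = some sn) :
    ∃ t, PySem.List.pyGet? (PySem.Chars.splitOn u.toList "\t".toList) 1 = some t := by
  have h2 : 2 ≤ (PySem.Chars.splitOn u.toList "\t".toList).length := by
    apply hp; rw [← pyGet?_zero]; exact h
  refine ⟨(PySem.Chars.splitOn u.toList "\t".toList)[1]'(by omega), ?_⟩
  rw [pyGet?_one]; exact List.getElem?_eq_getElem _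

lemma rev_append (sn : List Char) (xs ys : List String)
    (hpre : ∀ u ∈ xs, PreElem sn u) :
    getAdUserRev sn (xs ++ ys) = (getAdUserRev sn xs).orElse (fun _ => getAdUserRev sn ys) := by
  induction xs with
  | nil => simp [getAdUserRev]
  | cons u rest ih =>
    simp only [List.cons_append, getAdUserRev]
    split_ifs with h
    · rcases hit_field sn u (hpre u (by simp)) h with ⟨t, ht⟩
      simp only [tab_eq] at ht
      simp [ht, Option.orElse]
    · exact ih (fun v hv => hpre v (by simp [hv]))

lemma main_fold (sn : List Char) (l : List String) (acc : Option String)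
    (hpre : ∀ u ∈ l, PreElem sn u) :
    l.foldl
      (fun ad_user user =>
        let temp_list := PySem.Chars.splitOn user.toList "\t".toList
        if PySem.List.pyGet? temp_list 0 = some sn then
          match PySem.List.pyGet? temp_list 1 with
          | some t => some (String.ofList (rstripNL t))
          | none => ad_user
        else ad_user) acc
    = (getAdUserRev sn l.reverse).elim acc some := by
  induction l generalizing acc with
  | nil => simp [getAdUserRev]
  | cons u rest ih =>
    have hprest : ∀ v ∈ rest, PreElem sn v := fun v hv => hpre v (by simp [hv])
    have hprev : ∀ v ∈ rest.reverse, PreElem sn v := fun v hv => hprest v (List.mem_reverse.mp hv)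
    simp only [List.foldl_cons, List.reverse_cons]
    rw [ih _ hprest, rev_append sn rest.reverse [u] hprev]
    cases hb : getAdUserRev sn rest.reverse with
    | some v => simp [Option.orElse]
    | none =>
      by_cases h : PySem.List.pyGet? (PySem.Chars.splitOn u.toList "\t".toList) 0 = some sn
      · rcases hit_field sn u (hpre u (by simp)) h with ⟨t, ht⟩
        simp only [tab_eq] at ht h
        simp [Option.orElse, getAdUserRev, h, ht]
      · simp only [tab_eq] at h
        simp [Option.orElse, getAdUserRev, h]

-- ===== VERDICT (by name: the statement is the Claim_ definition above) =====
theorem get_ad_user_spec : Claim_equal_get_ad_user := by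
  intro sn ul _hdom hpre
  unfold Spec_get_ad_user get_ad_user get_ad_user_alt
  rw [main_fold sn.toList ul none hpre]
  cases getAdUserRev sn.toList ul.reverse <;> rfl
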